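-- pv_equiv track=rewrite | github.com/AlinaXZ/synergy-based-co-adaptive-framework-for-ulp-control | training.py | del_same_neighbor3
-- ===== SOURCE A (Python) =====
-- def del_same_neighbor3(list1, list2, list3):
--     # 删除列表相邻相同的元素
--     # list2按照list删除对应index元素
--     del_list =[]
--     for i in range(len(list1)-1):
--         if list1[i]==list1[i+1]:
--             del_list.append(i+1)
--
--     list1_copy = list1.copy()
--     list2_copy = list2.copy()
--     list3_copy = list3.copy()
--
--     del_df_list = []
--
--     for i, x in enumerate(del_list):
--         list1_copy.pop(x-i)
--         list2_copy.pop(x-i)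
--         del_df_list.append(list3_copy[x-i])
--         list3_copy.pop(x-i)
--
--     del_id = [list2[i] for i in del_list]
--
--     return list1_copy, list2_copy, list3_copy, del_id, del_df_list
-- ===== SOURCE B (Python) =====
-- def del_same_neighbor3(list1, list2, list3):
--     # single pass: mark positions equal to their left neighbour, then filter once
--     removed = [i for i in range(1, len(list1)) if list1[i] == list1[i - 1]]
--     removed_set = set(removed)
--     list1_new = [v for i, v in enumerate(list1) if i not in removed_set]
--     list2_new = [v for i, v in enumerate(list2) if i not in removed_set]
--     list3_new = [v for i, v in enumerate(list3) if i not in removed_set]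
--     del_id = [list2[i] for i in removed]
--     del_df_list = [list3[i] for i in removed]
--     return list1_new, list2_new, list3_new, del_id, del_df_list
-- ===== Notes on version B (the rewrite author's own statement) =====
-- stated objective: faster
-- what changed: B replaces A's pop-one-index-at-a-time loop (each list.pop shifts the whole tail) with a single marking pass that collects the removed indices and then builds each output list in one filter over enumerate.
import Mathlib
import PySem

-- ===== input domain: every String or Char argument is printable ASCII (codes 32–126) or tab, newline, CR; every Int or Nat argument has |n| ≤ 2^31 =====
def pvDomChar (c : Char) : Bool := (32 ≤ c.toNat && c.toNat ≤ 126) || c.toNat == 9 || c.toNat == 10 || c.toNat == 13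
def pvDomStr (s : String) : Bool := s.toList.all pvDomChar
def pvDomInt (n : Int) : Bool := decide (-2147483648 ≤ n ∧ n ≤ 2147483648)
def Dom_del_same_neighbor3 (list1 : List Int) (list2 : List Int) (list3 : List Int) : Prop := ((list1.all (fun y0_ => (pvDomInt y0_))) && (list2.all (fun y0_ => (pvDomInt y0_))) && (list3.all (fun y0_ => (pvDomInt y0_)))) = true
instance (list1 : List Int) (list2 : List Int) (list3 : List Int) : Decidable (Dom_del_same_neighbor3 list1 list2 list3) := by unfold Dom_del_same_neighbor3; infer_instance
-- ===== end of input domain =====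

-- B replaces A's quadratic pop-by-shifting loop with one marking pass and index filters; equivalence proved on inputs where A does not raise (Pre_).

-- ===== PORT A =====
-- literal transliteration of A: first loop collects del_list, second loop pops the three
-- copies in place (pop?/pyGetD return the Python value on every in-range index; out of
-- range Python raises, which Pre_ excludes)
def del_same_neighbor3 (list1 : List Int) (list2 : List Int) (list3 : List Int) : List Int × List Int × List Int × List Int × List Int :=
  let del_list : List Int :=
    (PySem.List.pyRange 0 ((list1.length : Int) - 1) 1).foldl
      (fun acc i =>
        if PySem.List.pyGetD list1 i 0 = PySem.List.pyGetD list1 (i + 1) 0 then acc ++ [i + 1] else acc) []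
  let st :=
    (PySem.List.enumerate del_list).foldl
      (fun (s : List Int × List Int × List Int × List Int) (p : Int × Int) =>
        (((PySem.List.pop? s.1 (p.2 - p.1)).map Prod.snd).getD s.1,
         ((PySem.List.pop? s.2.1 (p.2 - p.1)).map Prod.snd).getD s.2.1,
         ((PySem.List.pop? s.2.2.1 (p.2 - p.1)).map Prod.snd).getD s.2.2.1,
         s.2.2.2 ++ [PySem.List.pyGetD s.2.2.1 (p.2 - p.1) 0]))
      (list1, list2, list3, [])
  let del_id := del_list.map (fun i => PySem.List.pyGetD list2 i 0)
  (st.1, st.2.1, st.2.2.1, del_id, st.2.2.2)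

-- ===== PORT B =====
-- literal transliteration of Source B: removed-index list, then three enumerate-filters
def del_same_neighbor3_alt (list1 : List Int) (list2 : List Int) (list3 : List Int) : List Int × List Int × List Int × List Int × List Int :=
  let removed : List Int :=
    (PySem.List.pyRange 1 (list1.length : Int) 1).filter
      (fun i => PySem.List.pyGetD list1 i 0 == PySem.List.pyGetD list1 (i - 1) 0)
  let list1_new := ((PySem.List.enumerate list1).filter (fun p => decide (p.1 ∉ removed))).map Prod.snd
  let list2_new := ((PySem.List.enumerate list2).filter (fun p => decide (p.1 ∉ removed))).map Prod.snd
  let list3_new := ((PySem.List.enumerate list3).filter (fun p => decide (p.1 ∉ removed))).map Prod.snd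
  let del_id := removed.map (fun i => PySem.List.pyGetD list2 i 0)
  let del_df_list := removed.map (fun i => PySem.List.pyGetD list3 i 0)
  (list1_new, list2_new, list3_new, del_id, del_df_list)

-- ===== PRECONDITION & SPEC =====
-- Pre_ excludes exactly the inputs where A raises IndexError: a removed index (a position
-- equal to its left neighbour in list1) that is out of range for list2 or list3.
def Pre_del_same_neighbor3 (list1 : List Int) (list2 : List Int) (list3 : List Int) : Prop :=
  ∀ i ∈ List.range list1.length, i + 1 < list1.length → list1.getD i 0 = list1.getD (i + 1) 0 →
    i + 1 < list2.length ∧ i + 1 < list3.length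
instance (list1 : List Int) (list2 : List Int) (list3 : List Int) : Decidable (Pre_del_same_neighbor3 list1 list2 list3) := by unfold Pre_del_same_neighbor3; infer_instance

def pvWitness_del_same_neighbor3 : List Int × List Int × List Int := ([1, 1, 2], [10, 20, 30], [100, 200, 300])

def Spec_del_same_neighbor3 (list1 : List Int) (list2 : List Int) (list3 : List Int) (out : List Int × List Int × List Int × List Int × List Int) : Prop := out = del_same_neighbor3_alt list1 list2 list3
instance (list1 : List Int) (list2 : List Int) (list3 : List Int) (out : List Int × List Int × List Int × List Int × List Int) : Decidable (Spec_del_same_neighbor3 list1 list2 list3 out) := by unfold Spec_del_same_neighbor3; infer_instance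

-- ===== CLAIM (what is proved, stated in full; the proofs are below) =====
def Claim_equal_del_same_neighbor3 : Prop := ∀ (list1 : List Int) (list2 : List Int) (list3 : List Int), Dom_del_same_neighbor3 list1 list2 list3 → Pre_del_same_neighbor3 list1 list2 list3 → Spec_del_same_neighbor3 list1 list2 list3 (del_same_neighbor3 list1 list2 list3)

-- ===== LEMMAS AND PROOFS =====

-- keep the elements of l whose label (counting from i) is not in ds
def pvKeep (l : List Int) (ds : List Int) (i : Int) : List Int :=
  ((PySem.List.enumerate l i).filter (fun p => decide (p.1 ∉ ds))).map Prod.snd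

theorem pvKeep_cons (a : Int) (t ds : List Int) (i : Int) :
    pvKeep (a :: t) ds i = (if i ∈ ds then [] else [a]) ++ pvKeep t ds (i + 1) := by
  simp [pvKeep, PySem.List.enumerate_cons, List.filter_cons]
  split_ifs with h <;> simp

theorem pvKeep_no_ds (l ds : List Int) (i : Int) (h : ∀ x ∈ ds, x < i) :
    pvKeep l ds i = l := by
  induction l generalizing i with
  | nil => rfl
  | cons a t ih =>
      rw [pvKeep_cons]
      have hi : i ∉ ds := fun hmem => absurd (h i hmem) (by omega)
      simp [hi, ih (i + 1) (fun x hx => by have := h x hx; omega)]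

theorem pvKeep_drop_lt (l : List Int) (c : Int) (ds : List Int) (j : Int) (hc : c < j) :
    pvKeep l (c :: ds) j = pvKeep l ds j := by
  induction l generalizing j with
  | nil => rfl
  | cons a t ih =>
      rw [pvKeep_cons, pvKeep_cons]
      have hiff : (j ∈ c :: ds) = (j ∈ ds) := by
        simp only [List.mem_cons, eq_iff_iff]
        exact ⟨fun h => h.resolve_left (by omega), Or.inr⟩
      rw [ih (j + 1) (by omega)]
      simp only [hiff]

-- erasing label d from l (labels from i) and dropping labels ds afterwards
-- equals dropping labels d::ds from l
theorem pvKeep_erase (l : List Int) (d i : Int) (ds : List Int)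
    (hid : i ≤ d) (hd : d - i < l.length) (hds : ∀ x ∈ ds, d < x) :
    pvKeep (l.eraseIdx (d - i).toNat) ds (i + 1) = pvKeep l (d :: ds) i := by
  induction l generalizing d i with
  | nil => simp at hd; omega
  | cons a t ih =>
      by_cases hdi : d = i
      · subst hdi
        have : (d - d).toNat = 0 := by omega
        rw [this]
        simp only [List.eraseIdx_cons_zero]
        rw [pvKeep_cons]
        have : d ∈ d :: ds := List.mem_cons_self
        simp only [this, if_pos, List.nil_append]
        exact (pvKeep_drop_lt t d ds (d + 1) (by omega)).symm
      · have h1 : (d - i).toNat = (d - (i + 1)).toNat + 1 := by omega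
        rw [h1]
        simp only [List.eraseIdx_cons_succ]
        rw [pvKeep_cons, pvKeep_cons]
        have hi1 : i + 1 ∉ ds := fun hmem => absurd (hds _ hmem) (by omega)
        have hi : i ∉ d :: ds := by
          simp [List.mem_cons]
          exact ⟨by omega, fun hmem => absurd (hds _ hmem) (by omega)⟩
        simp only [hi1, hi, if_neg, not_false_iff]
        have ht := ih d (i + 1) (by omega) (by simp at hd ⊢; omega) hds
        rw [ht]

-- value of list3 at a removed label is unchanged by the earlier erasure
theorem pvGetD_erase (l : List Int) (d i x : Int)
    (hid : i ≤ d) (hdx : d < x) (hx : x < l.length + i) :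
    PySem.List.pyGetD (l.eraseIdx (d - i).toNat) (x - (i + 1)) 0 = PySem.List.pyGetD l (x - i) 0 := by
  have hdlen : (d - i).toNat < l.length := by omega
  have hlen : (l.eraseIdx (d - i).toNat).length = l.length - 1 := by
    rw [List.length_eraseIdx]; simp [hdlen]
  rw [PySem.List.pyGetD_eq_getElem (l.eraseIdx (d - i).toNat) 0 (by omega) (by rw [hlen]; omega),
      PySem.List.pyGetD_eq_getElem l 0 (by omega) (by omega)]
  rw [List.getElem_eraseIdx]
  rw [dif_neg (by omega : ¬ (x - (i + 1)).toNat < (d - i).toNat)]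
  congr 1
  omega

-- the pop loop of A computes pvKeep on each list and collects the removed list3 values
theorem pvPopLoop (ds : List Int) :
    ∀ (l1 l2 l3 df : List Int) (i : Int),
    ds.Pairwise (· < ·) →
    (∀ x ∈ ds, i ≤ x ∧ x < (l1.length : Int) + i ∧ x < (l2.length : Int) + i ∧ x < (l3.length : Int) + i) →
    (PySem.List.enumerate ds i).foldl
      (fun (s : List Int × List Int × List Int × List Int) (p : Int × Int) =>
        (((PySem.List.pop? s.1 (p.2 - p.1)).map Prod.snd).getD s.1,
         ((PySem.List.pop? s.2.1 (p.2 - p.1)).map Prod.snd).getD s.2.1,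
         ((PySem.List.pop? s.2.2.1 (p.2 - p.1)).map Prod.snd).getD s.2.2.1,
         s.2.2.2 ++ [PySem.List.pyGetD s.2.2.1 (p.2 - p.1) 0]))
      (l1, l2, l3, df) =
    (pvKeep l1 ds i, pvKeep l2 ds i, pvKeep l3 ds i,
     df ++ ds.map (fun x => PySem.List.pyGetD l3 (x - i) 0)) := by
  induction ds with
  | nil =>
      intro l1 l2 l3 df i _ _
      rw [PySem.List.enumerate_nil]
      simp only [List.foldl_nil, List.map_nil, List.append_nil]
      rw [pvKeep_no_ds l1 [] i (by simp), pvKeep_no_ds l2 [] i (by simp),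
          pvKeep_no_ds l3 [] i (by simp)]
  | cons d t ih =>
      intro l1 l2 l3 df i hp hb
      have hd := hb d (List.mem_cons_self)
      have popEq : ∀ (l : List Int), (d : Int) - i < (l.length : Int) →
          ((PySem.List.pop? l (d - i)).map Prod.snd).getD l = l.eraseIdx (d - i).toNat := by
        intro l hl
        have h1 : (d - i) = (((d - i).toNat : Nat) : Int) := by omega
        rw [h1, PySem.List.pop?_natCast l (d - i).toNat (by omega)]
        rfl
      rw [PySem.List.enumerate_cons, List.foldl_cons]
      simp only
      rw [popEq l1 (by omega), popEq l2 (by omega), popEq l3 (by omega)]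
      have hpt : t.Pairwise (· < ·) := hp.of_cons
      have hdt : ∀ x ∈ t, d < x := fun x hx => (List.pairwise_cons.mp hp).1 x hx
      have hlen : ∀ (l : List Int), (d : Int) - i < (l.length : Int) →
          ((l.eraseIdx (d - i).toNat).length : Int) = (l.length : Int) - 1 := by
        intro l hl
        rw [List.length_eraseIdx]
        simp only [show (d - i).toNat < l.length by omega, if_pos]
        omega
      rw [ih _ _ _ _ (i + 1) hpt ?bounds]
      case bounds =>
        intro x hx
        have hxb := hb x (List.mem_cons_of_mem _ hx)
        have hdx := hdt x hx
        rw [hlen l1 (by omega), hlen l2 (by omega), hlen l3 (by omega)]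
        omega
      rw [pvKeep_erase l1 d i t (by omega) (by omega) hdt,
          pvKeep_erase l2 d i t (by omega) (by omega) hdt,
          pvKeep_erase l3 d i t (by omega) (by omega) hdt]
      congr 1
      congr 1
      congr 1
      rw [List.map_congr_left (fun x hx => pvGetD_erase l3 d i x (by omega) (hdt x hx)
            (by have := hb x (List.mem_cons_of_mem _ hx); omega))]
      simp [List.map_cons]

-- A's del_list equals B's removed list
theorem pvDels_eq (l1 : List Int) :
    (PySem.List.pyRange 0 ((l1.length : Int) - 1) 1).foldl
      (fun acc i =>
        if PySem.List.pyGetD l1 i 0 = PySem.List.pyGetD l1 (i + 1) 0 then acc ++ [i + 1] else acc) [] =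
    (PySem.List.pyRange 1 (l1.length : Int) 1).filter
      (fun i => PySem.List.pyGetD l1 i 0 == PySem.List.pyGetD l1 (i - 1) 0) := by
  rw [PySem.List.foldl_append_ite]
  simp only [List.nil_append]
  have hmap : (PySem.List.pyRange 1 (l1.length : Int) 1) =
      (PySem.List.pyRange 0 ((l1.length : Int) - 1) 1).map (fun i => i + 1) := by
    rw [PySem.List.pyRange_one, PySem.List.pyRange_one]
    simp [List.map_map, Function.comp]
    intro a _
    omega
  rw [hmap, List.filter_map]
  congr 1
  apply List.filter_congr
  intro x _
  simp only [Function.comp]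
  have h1 : (x + 1 - 1) = x := by omega
  rw [h1]
  apply Bool.eq_iff_iff.mpr
  simp only [beq_iff_eq, decide_eq_true_eq]
  exact eq_comm

-- membership in B's removed list
theorem pvMem_removed (l1 : List Int) (x : Int)
    (hx : x ∈ (PySem.List.pyRange 1 (l1.length : Int) 1).filter
      (fun i => PySem.List.pyGetD l1 i 0 == PySem.List.pyGetD l1 (i - 1) 0)) :
    1 ≤ x ∧ x < (l1.length : Int) ∧ PySem.List.pyGetD l1 x 0 = PySem.List.pyGetD l1 (x - 1) 0 := by
  rw [List.mem_filter, PySem.List.mem_pyRange_one] at hx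
  refine ⟨hx.1.1, hx.1.2, ?_⟩
  have := hx.2
  simpa using this

-- ===== VERDICT (by name: the statement is the Claim_ definition above) =====
theorem del_same_neighbor3_spec : Claim_equal_del_same_neighbor3 := by
  intro l1 l2 l3 _ hpre
  unfold Spec_del_same_neighbor3
  unfold del_same_neighbor3 del_same_neighbor3_alt
  dsimp only
  rw [pvDels_eq l1]
  set ds := (PySem.List.pyRange 1 (l1.length : Int) 1).filter
      (fun i => PySem.List.pyGetD l1 i 0 == PySem.List.pyGetD l1 (i - 1) 0) with hds
  have hbound : ∀ x ∈ ds, 1 ≤ x ∧ x < (l1.length : Int) ∧ x < (l2.length : Int) ∧ x < (l3.length : Int) := by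
    intro x hx
    obtain ⟨h1, h2, h3⟩ := pvMem_removed l1 x hx
    have hi : (x.toNat - 1) ∈ List.range l1.length := by
      rw [List.mem_range]; omega
    have hnat : x.toNat - 1 + 1 = x.toNat := by omega
    have := hpre (x.toNat - 1) hi (by omega) ?geq
    case geq =>
      have g1 : l1.getD (x.toNat - 1) 0 = PySem.List.pyGetD l1 (((x.toNat - 1 : Nat) : Nat) : Int) 0 :=
        (PySem.List.pyGetD_natCast _ _ _).symm
      have g2 : l1.getD (x.toNat - 1 + 1) 0 = PySem.List.pyGetD l1 (((x.toNat - 1 + 1 : Nat) : Nat) : Int) 0 :=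
        (PySem.List.pyGetD_natCast _ _ _).symm
      rw [g1, g2]
      have e1 : (((x.toNat - 1 : Nat) : Nat) : Int) = x - 1 := by omega
      have e2 : (((x.toNat - 1 + 1 : Nat) : Nat) : Int) = x := by omega
      rw [e1, e2]
      exact h3.symm
    rw [hnat] at this
    omega
  have hpw : ds.Pairwise (· < ·) := List.Pairwise.filter _ (PySem.List.pairwise_lt_pyRange_one 1 _)
  rw [pvPopLoop ds l1 l2 l3 [] 0 hpw (by intro x hx; have := hbound x hx; omega)]
  simp only [List.nil_append]
  have hkeep : ∀ (l : List Int), pvKeep l ds 0 =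
      ((PySem.List.enumerate l).filter (fun p => decide (p.1 ∉ ds))).map Prod.snd := fun l => rfl
  rw [hkeep l1, hkeep l2, hkeep l3]
  have hdf : ds.map (fun x => PySem.List.pyGetD l3 (x - 0) 0) = ds.map (fun i => PySem.List.pyGetD l3 i 0) := by
    apply List.map_congr_left; intro x _; norm_num
  rw [hdf]
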